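-- pv_equiv track=rewrite | github.com/axcelerateai/urdu-handwriting-recognition-using-deep-learning | utils/data_utils.py | _split_str_at
-- ===== SOURCE A (Python) =====
-- def _split_str_at(string, split_at, extenders=None, spacers=None, isolated=None, isolated_extenders=None):
--     last_cut = -1
--     i = 0
--     while True:
--         if isolated is not None and ord(string[i]) in isolated:
--             if isolated_extenders is not None:
--                 while i != len(string)-1 and ord(string[i+1]) in isolated_extenders:
--                     i += 1
--             yield string[last_cut+1:i]
--             yield str(string[i])
--             last_cut = i
--         elif spacers is not None and ord(string[i]) in spacers:
--             yield string[last_cut+1:i]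
--             last_cut = i
--         elif ord(string[i]) in split_at:
--             if extenders is not None:
--                 while i != len(string)-1 and ord(string[i+1]) in extenders:
--                     i += 1
--             yield string[last_cut+1:i+1]
--             last_cut = i
--
--         i += 1
--         if i == len(string):
--             break
--
--     if i != last_cut:
--         yield string[last_cut+1:]
-- ===== SOURCE B (Python) =====
-- def _split_str_at(string, split_at, extenders=None, spacers=None, isolated=None, isolated_extenders=None):
--     n = len(string)
--     # pass 1: boundary records (slice_end, isolated_char_or_None, gap_to_next_start)
--     records = []
--     i = 0
--     while i < n:
--         c = ord(string[i])
--         if isolated is not None and c in isolated: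
--             if isolated_extenders is not None:
--                 while i + 1 < n and ord(string[i + 1]) in isolated_extenders:
--                     i += 1
--             records.append((i, string[i], 1))
--         elif spacers is not None and c in spacers:
--             records.append((i, None, 1))
--         elif c in split_at:
--             if extenders is not None:
--                 while i + 1 < n and ord(string[i + 1]) in extenders:
--                     i += 1
--             records.append((i + 1, None, 0))
--         i += 1
--     # pass 2: emit slices between cuts
--     start = 0
--     for end, ch, gap in records:
--         yield string[start:end]
--         if ch is not None:
--             yield ch
--         start = end + gap
--     yield string[start:]
-- ===== Notes on version B (the rewrite author's own statement) =====
-- stated objective: alternative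
-- what changed: B replaces A's single generator loop that interleaves scanning and yielding with two passes: a first pass that only records boundary records (slice end, optional isolated char, gap to next start) and a second pass that emits the slices from those records.
import Mathlib
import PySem

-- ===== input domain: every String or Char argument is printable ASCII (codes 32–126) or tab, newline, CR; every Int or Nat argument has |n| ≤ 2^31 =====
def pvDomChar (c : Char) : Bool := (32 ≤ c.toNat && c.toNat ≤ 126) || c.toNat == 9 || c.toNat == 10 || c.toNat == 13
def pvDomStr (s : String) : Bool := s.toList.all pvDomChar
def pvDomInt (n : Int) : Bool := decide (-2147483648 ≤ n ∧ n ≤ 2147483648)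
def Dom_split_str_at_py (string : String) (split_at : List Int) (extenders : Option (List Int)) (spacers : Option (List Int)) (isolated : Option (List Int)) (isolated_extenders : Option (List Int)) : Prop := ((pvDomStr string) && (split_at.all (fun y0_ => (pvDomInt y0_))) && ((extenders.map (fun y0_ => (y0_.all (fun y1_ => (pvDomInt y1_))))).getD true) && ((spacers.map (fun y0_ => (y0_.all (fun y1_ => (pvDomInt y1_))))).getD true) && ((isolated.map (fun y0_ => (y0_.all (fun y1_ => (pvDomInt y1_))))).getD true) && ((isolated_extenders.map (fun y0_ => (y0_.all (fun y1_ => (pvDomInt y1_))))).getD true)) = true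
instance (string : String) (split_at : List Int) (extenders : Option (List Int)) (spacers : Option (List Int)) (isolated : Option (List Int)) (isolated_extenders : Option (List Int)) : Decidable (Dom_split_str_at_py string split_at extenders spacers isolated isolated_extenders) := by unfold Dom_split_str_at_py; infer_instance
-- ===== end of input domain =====

-- B replaces A's single scan-and-yield generator loop by two passes (collect boundary
-- records, then emit the slices); same yielded values on every nonempty string (alternative
-- decomposition, not faster). A is a generator; equivalence is about the yielded sequence.

-- 'o is not None and c in o' (shared literal condition of both Python sources)
def pvHit (o : Option (List Int)) (c : Int) : Bool :=
  match o with
  | some l => l.contains c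
  | none => false

-- ===== PORT A =====
-- A's inner 'while i != len(string)-1 and ord(string[i+1]) in ext: i += 1' (fuel-bounded; fuel = len suffices)
def pvExtendA (cs : List Char) (ext : List Int) : Nat → Nat → Nat
  | 0, i => i
  | fuel+1, i =>
    if i ≠ cs.length - 1 ∧ ext.contains ((cs.getD (i+1) ' ').toNat : Int) then
      pvExtendA cs ext fuel (i+1)
    else i

-- 'if <opt> is not None: <extend>' of A
def pvMaybeExtendA (cs : List Char) (o : Option (List Int)) (i : Nat) : Nat :=
  match o with
  | some l => pvExtendA cs l cs.length i
  | none => i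

-- A's trailing 'if i != last_cut: yield string[last_cut+1:]'
def pvTailA (cs : List Char) (last_cut : Int) (i : Nat) : List String :=
  if (i : Int) ≠ last_cut then [String.ofList (PySem.List.slice cs (some (last_cut + 1)) none)] else []

-- A's 'while True' body; the generator's yields collected in order
def pvLoopA (cs : List Char) (sp : List Int) (ext spc iso isoExt : Option (List Int)) : Nat → Int → Nat → List String
  | 0, _, _ => []
  | fuel+1, last_cut, i =>
    let c : Int := ((cs.getD i ' ').toNat : Int)
    let cont : Int → Nat → List String := fun lc i' =>
      if i' + 1 = cs.length then pvTailA cs lc (i' + 1)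
      else pvLoopA cs sp ext spc iso isoExt fuel lc (i' + 1)
    if pvHit iso c then
      let j : Nat := pvMaybeExtendA cs isoExt i
      String.ofList (PySem.List.slice cs (some (last_cut + 1)) (some (j : Int))) ::
        String.ofList [cs.getD j ' '] :: cont (j : Int) j
    else if pvHit spc c then
      String.ofList (PySem.List.slice cs (some (last_cut + 1)) (some (i : Int))) :: cont (i : Int) i
    else if sp.contains c then
      let j : Nat := pvMaybeExtendA cs ext i
      String.ofList (PySem.List.slice cs (some (last_cut + 1)) (some ((j : Int) + 1))) :: cont (j : Int) j
    else cont last_cut i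

def split_str_at_py (string : String) (split_at : List Int) (extenders : Option (List Int)) (spacers : Option (List Int)) (isolated : Option (List Int)) (isolated_extenders : Option (List Int)) : List String :=
  pvLoopA string.toList split_at extenders spacers isolated isolated_extenders string.toList.length (-1) 0

-- ===== PORT B =====
-- B's inner 'while i + 1 < n and ord(string[i+1]) in ext: i += 1'
def pvExtendB (cs : List Char) (ext : List Int) : Nat → Nat → Nat
  | 0, i => i
  | fuel+1, i =>
    if i + 1 < cs.length ∧ ext.contains ((cs.getD (i+1) ' ').toNat : Int) then
      pvExtendB cs ext fuel (i+1)
    else i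

-- 'if <opt> is not None: <extend>' of B
def pvMaybeExtendB (cs : List Char) (o : Option (List Int)) (i : Nat) : Nat :=
  match o with
  | some l => pvExtendB cs l cs.length i
  | none => i

-- B's pass 1: boundary records (slice_end, isolated_char?, gap to next start)
def pvRecs (cs : List Char) (sp : List Int) (ext spc iso isoExt : Option (List Int)) : Nat → Nat → List (Nat × Option Char × Nat)
  | 0, _ => []
  | fuel+1, i =>
    if i < cs.length then
      let c : Int := ((cs.getD i ' ').toNat : Int)
      if pvHit iso c then
        let j : Nat := pvMaybeExtendB cs isoExt i
        (j, some (cs.getD j ' '), 1) :: pvRecs cs sp ext spc iso isoExt fuel (j+1)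
      else if pvHit spc c then
        (i, none, 1) :: pvRecs cs sp ext spc iso isoExt fuel (i+1)
      else if sp.contains c then
        let j : Nat := pvMaybeExtendB cs ext i
        (j+1, none, 0) :: pvRecs cs sp ext spc iso isoExt fuel (j+1)
      else pvRecs cs sp ext spc iso isoExt fuel (i+1)
    else []

-- B's pass 2: emit the slices between cuts, plus the trailing slice
def pvEmit (cs : List Char) : Nat → List (Nat × Option Char × Nat) → List String
  | start, [] => [String.ofList (PySem.List.slice cs (some (start : Int)) none)]
  | start, (e, ch, gap) :: rest =>
    String.ofList (PySem.List.slice cs (some (start : Int)) (some (e : Int))) ::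
      (match ch with
       | some c => String.ofList [c] :: pvEmit cs (e + gap) rest
       | none => pvEmit cs (e + gap) rest)

def split_str_at_py_alt (string : String) (split_at : List Int) (extenders : Option (List Int)) (spacers : Option (List Int)) (isolated : Option (List Int)) (isolated_extenders : Option (List Int)) : List String :=
  pvEmit string.toList 0 (pvRecs string.toList split_at extenders spacers isolated isolated_extenders string.toList.length 0)

-- ===== PRECONDITION & SPEC =====
-- A raises IndexError on the empty string (it indexes string[0] before any length check); only that input is excluded.
def Pre_split_str_at_py (string : String) (split_at : List Int) (extenders : Option (List Int)) (spacers : Option (List Int)) (isolated : Option (List Int)) (isolated_extenders : Option (List Int)) : Prop :=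
  string ≠ ""
instance (string : String) (split_at : List Int) (extenders : Option (List Int)) (spacers : Option (List Int)) (isolated : Option (List Int)) (isolated_extenders : Option (List Int)) : Decidable (Pre_split_str_at_py string split_at extenders spacers isolated isolated_extenders) := by unfold Pre_split_str_at_py; infer_instance

def pvWitness_split_str_at_py : String × List Int × Option (List Int) × Option (List Int) × Option (List Int) × Option (List Int) :=
  ("a.b", [46], none, none, none, none)

def Spec_split_str_at_py (string : String) (split_at : List Int) (extenders : Option (List Int)) (spacers : Option (List Int)) (isolated : Option (List Int)) (isolated_extenders : Option (List Int)) (out : List String) : Prop := out = split_str_at_py_alt string split_at extenders spacers isolated isolated_extenders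
instance (string : String) (split_at : List Int) (extenders : Option (List Int)) (spacers : Option (List Int)) (isolated : Option (List Int)) (isolated_extenders : Option (List Int)) (out : List String) : Decidable (Spec_split_str_at_py string split_at extenders spacers isolated isolated_extenders out) := by unfold Spec_split_str_at_py; infer_instance

-- ===== CLAIM (what is proved, stated in full; the proofs are below) =====
def Claim_equal_split_str_at_py : Prop := ∀ (string : String) (split_at : List Int) (extenders : Option (List Int)) (spacers : Option (List Int)) (isolated : Option (List Int)) (isolated_extenders : Option (List Int)), Dom_split_str_at_py string split_at extenders spacers isolated isolated_extenders → Pre_split_str_at_py string split_at extenders spacers isolated isolated_extenders → Spec_split_str_at_py string split_at extenders spacers isolated isolated_extenders (split_str_at_py string split_at extenders spacers isolated isolated_extenders)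

-- ===== LEMMAS AND PROOFS =====

theorem pvExtend_eq (cs : List Char) (l : List Int) :
    ∀ fuel i, i < cs.length → pvExtendA cs l fuel i = pvExtendB cs l fuel i := by
  intro fuel
  induction fuel with
  | zero => intro i _; rfl
  | succ fuel ih =>
    intro i hi
    simp only [pvExtendA, pvExtendB]
    have hiff : (i ≠ cs.length - 1) ↔ (i + 1 < cs.length) := by omega
    by_cases h : i + 1 < cs.length ∧ l.contains ((cs.getD (i+1) ' ').toNat : Int) = true
    · rw [if_pos h, if_pos ⟨hiff.mpr h.1, h.2⟩]
      exact ih (i+1) h.1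
    · rw [if_neg h, if_neg (by tauto)]

theorem pvExtendB_le (cs : List Char) (l : List Int) :
    ∀ fuel i, i ≤ pvExtendB cs l fuel i := by
  intro fuel
  induction fuel with
  | zero => intro i; exact le_refl i
  | succ fuel ih =>
    intro i
    simp only [pvExtendB]
    split
    · exact le_trans (Nat.le_succ i) (ih (i+1))
    · exact le_refl i

theorem pvExtendB_lt (cs : List Char) (l : List Int) :
    ∀ fuel i, i < cs.length → pvExtendB cs l fuel i < cs.length := by
  intro fuel
  induction fuel with
  | zero => intro i hi; exact hi
  | succ fuel ih =>
    intro i hi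
    simp only [pvExtendB]
    split
    · next h => exact ih (i+1) h.1
    · exact hi

theorem pvMaybeExtend_eq (cs : List Char) (o : Option (List Int)) (i : Nat) (hi : i < cs.length) :
    pvMaybeExtendA cs o i = pvMaybeExtendB cs o i := by
  cases o with
  | none => rfl
  | some l => exact pvExtend_eq cs l cs.length i hi

theorem pvMaybeExtendB_le (cs : List Char) (o : Option (List Int)) (i : Nat) :
    i ≤ pvMaybeExtendB cs o i := by
  cases o with
  | none => exact le_refl i
  | some l => exact pvExtendB_le cs l cs.length i

theorem pvMaybeExtendB_lt (cs : List Char) (o : Option (List Int)) (i : Nat) (hi : i < cs.length) :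
    pvMaybeExtendB cs o i < cs.length := by
  cases o with
  | none => exact hi
  | some l => exact pvExtendB_lt cs l cs.length i hi

-- the index the step advances to in each branch of both loops
theorem pvLoop_eq_emit (cs : List Char) (sp : List Int) (ext spc iso isoExt : Option (List Int)) :
    ∀ fuel i start, i < cs.length → cs.length ≤ i + fuel → start ≤ i →
      pvLoopA cs sp ext spc iso isoExt fuel ((start : Int) - 1) i
        = pvEmit cs start (pvRecs cs sp ext spc iso isoExt fuel i) := by
  intro fuel
  induction fuel with
  | zero => intro i start hi hfuel _; omega
  | succ fuel ih =>
    intro i start hi hfuel hstart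
    have hnext : ∀ (lc : Int) (i' : Nat), lc = (i' : Int) → i' < cs.length → i ≤ i' →
        (if i' + 1 = cs.length then pvTailA cs lc (i' + 1)
         else pvLoopA cs sp ext spc iso isoExt fuel lc (i' + 1))
          = pvEmit cs (i' + 1) (pvRecs cs sp ext spc iso isoExt fuel (i' + 1)) := by
      intro lc i' hlc hi' hii'
      by_cases hend : i' + 1 = cs.length
      · rw [if_pos hend]
        have hrecs : pvRecs cs sp ext spc iso isoExt fuel (i' + 1) = [] := by
          cases fuel with
          | zero => rfl
          | succ fuel => simp only [pvRecs]; rw [if_neg (by omega)]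
        rw [hrecs]
        simp only [pvTailA, pvEmit]
        rw [if_pos (by rw [hlc]; push_cast; omega)]
        have h1 : lc + 1 = ((i' + 1 : Nat) : Int) := by rw [hlc]; push_cast; ring
        rw [h1]
      · rw [if_neg hend]
        have : lc = ((i' + 1 : Nat) : Int) - 1 := by rw [hlc]; push_cast; ring
        rw [this]
        exact ih (i' + 1) (i' + 1) (by omega) (by omega) (le_refl _)
    simp only [pvLoopA, pvRecs]
    rw [if_pos hi]
    set c : Int := ((cs.getD i ' ').toNat : Int) with hc
    by_cases hIso : pvHit iso c = true
    · rw [if_pos hIso, if_pos hIso]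
      rw [pvMaybeExtend_eq cs isoExt i hi]
      set j := pvMaybeExtendB cs isoExt i with hj
      have hij : i ≤ j := pvMaybeExtendB_le cs isoExt i
      have hjlt : j < cs.length := pvMaybeExtendB_lt cs isoExt i hi
      simp only [pvEmit]
      rw [hnext (j : Int) j rfl hjlt hij]
      have hs : (start : Int) - 1 + 1 = (start : Int) := by ring
      rw [hs]
    · rw [if_neg hIso, if_neg hIso]
      by_cases hSpc : pvHit spc c = true
      · rw [if_pos hSpc, if_pos hSpc]
        simp only [pvEmit]
        rw [hnext (i : Int) i rfl hi (le_refl i)]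
        have hs : (start : Int) - 1 + 1 = (start : Int) := by ring
        rw [hs]
      · rw [if_neg hSpc, if_neg hSpc]
        by_cases hSp : sp.contains c = true
        · rw [if_pos hSp, if_pos hSp]
          rw [pvMaybeExtend_eq cs ext i hi]
          set j := pvMaybeExtendB cs ext i with hj
          have hij : i ≤ j := pvMaybeExtendB_le cs ext i
          have hjlt : j < cs.length := pvMaybeExtendB_lt cs ext i hi
          simp only [pvEmit]
          rw [hnext (j : Int) j rfl hjlt hij]
          have hs : (start : Int) - 1 + 1 = (start : Int) := by ring
          have h2 : (j : Int) + 1 = ((j + 1 : Nat) : Int) := by push_cast; ring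
          rw [hs, h2]
        · rw [if_neg hSp, if_neg hSp]
          by_cases hend : i + 1 = cs.length
          · rw [if_pos hend]
            have hrecs : pvRecs cs sp ext spc iso isoExt fuel (i + 1) = [] := by
              cases fuel with
              | zero => rfl
              | succ fuel => simp only [pvRecs]; rw [if_neg (by omega)]
            rw [hrecs]
            simp only [pvTailA, pvEmit]
            rw [if_pos (by push_cast; omega)]
            have h1 : (start : Int) - 1 + 1 = ((start : Nat) : Int) := by ring
            rw [h1]
          · rw [if_neg hend]
            exact ih (i + 1) start (by omega) (by omega) (by omega)

-- ===== VERDICT (by name: the statement is the Claim_ definition above) =====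
theorem split_str_at_py_spec : Claim_equal_split_str_at_py := by
  intro string sp ext spc iso isoExt _ hpre
  unfold Spec_split_str_at_py split_str_at_py split_str_at_py_alt
  have hne : string.toList ≠ [] := by
    intro h
    exact hpre (String.toList_eq_nil_iff.mp h)
  have hlen : 0 < string.toList.length := List.length_pos_of_ne_nil hne
  have := pvLoop_eq_emit string.toList sp ext spc iso isoExt string.toList.length 0 0 hlen (by omega) (le_refl 0)
  simpa using this
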